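-- pv_equiv track=rewrite | github.com/quirkdom/calm | calm/cli.py | _decode_fish_history_command
-- ===== SOURCE A (Python) =====
-- def _decode_fish_history_command(command: str) -> str | None:
--     if not command:
--         return None
--
--     decoded: list[str] = []
--     index = 0
--     while index < len(command):
--         char = command[index]
--         if char != "\\":
--             decoded.append(char)
--             index += 1
--             continue
--
--         index += 1
--         if index >= len(command):
--             decoded.append("\\")
--             break
--
--         escaped = command[index]
--         if escaped == "n":
--             decoded.append("\n")
--         elif escaped == "\\":
--             decoded.append("\\")
--         else:
--             decoded.append(escaped)
--         index += 1
--
--     text = "".join(decoded).strip()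
--     return text or None
-- ===== SOURCE B (Python) =====
-- import re
--
--
-- def _decode_fish_history_command(command: str) -> str | None:
--     if not command:
--         return None
--     text = re.sub(
--         r"\\(.)",
--         lambda m: "\n" if m.group(1) == "n" else m.group(1),
--         command,
--         flags=re.DOTALL,
--     ).strip()
--     return text or None
-- ===== Notes on version B (the rewrite author's own statement) =====
-- stated objective: idiomatic
-- what changed: Replaced the hand-written index/cursor while-loop with a single non-overlapping regex substitution re.sub(r'\\(.)', repl, command, flags=re.DOTALL) followed by the same strip/or-None tail.
import Mathlib
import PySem

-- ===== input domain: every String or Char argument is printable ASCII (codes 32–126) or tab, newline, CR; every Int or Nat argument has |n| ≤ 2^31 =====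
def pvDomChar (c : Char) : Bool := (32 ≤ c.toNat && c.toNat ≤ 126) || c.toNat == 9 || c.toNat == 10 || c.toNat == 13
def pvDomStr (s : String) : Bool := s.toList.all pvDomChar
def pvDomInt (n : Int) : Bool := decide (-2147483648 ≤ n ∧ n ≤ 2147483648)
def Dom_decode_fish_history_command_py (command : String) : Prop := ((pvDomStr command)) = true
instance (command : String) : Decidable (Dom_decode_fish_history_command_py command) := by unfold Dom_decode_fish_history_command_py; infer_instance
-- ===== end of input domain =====

-- B replaces A's hand-written index/cursor while-loop by a single regex substitution
-- (re.sub over non-overlapping matches of r'\\(.)') with the same strip/or-None tail.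

-- ===== PORT A =====
-- the while loop: index cursor over the characters, appending to `decoded`
def pvALoop (cmd : List Char) (index : Nat) (decoded : List Char) : List Char :=
  if h : index < cmd.length then
    let char := cmd[index]
    if char ≠ '\\' then
      pvALoop cmd (index + 1) (decoded ++ [char])
    else if h2 : index + 1 < cmd.length then
      let escaped := cmd[index + 1]
      let decoded :=
        if escaped = 'n' then decoded ++ ['\n']
        else if escaped = '\\' then decoded ++ ['\\']
        else decoded ++ [escaped]
      pvALoop cmd (index + 2) decoded
    else
      decoded ++ ['\\']   -- index >= len(command) after the bump: append '\\' and break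
  else decoded
termination_by cmd.length - index

def decode_fish_history_command_py (command : String) : Option String :=
  if command = "" then none
  else
    let text := PySem.Str.strip (String.mk (pvALoop command.toList 0 []))
    if text = "" then none else some text

-- ===== PORT B =====
-- re.sub(r'\\(.)', repl, command, flags=re.DOTALL): each non-overlapping match of a
-- backslash plus any one character is replaced by repl; a lone trailing backslash
-- has no following character, does not match, and stays. Ported exactly for this
-- pattern as a left-to-right scanner consuming two characters per match.
def pvBSub : List Char → List Char
  | [] => []
  | [c] => [c]
  | c :: c2 :: rest =>
    if c = '\\' then (if c2 = 'n' then '\n' else c2) :: pvBSub rest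
    else c :: pvBSub (c2 :: rest)

def decode_fish_history_command_py_alt (command : String) : Option String :=
  if command = "" then none
  else
    let text := PySem.Str.strip (String.mk (pvBSub command.toList))
    if text = "" then none else some text

-- ===== PRECONDITION & SPEC =====
def Spec_decode_fish_history_command_py (command : String) (out : Option String) : Prop := out = decode_fish_history_command_py_alt command
instance (command : String) (out : Option String) : Decidable (Spec_decode_fish_history_command_py command out) := by unfold Spec_decode_fish_history_command_py; infer_instance

-- ===== CLAIM (what is proved, stated in full; the proofs are below) =====
def Claim_equal_decode_fish_history_command_py : Prop := ∀ (command : String), Dom_decode_fish_history_command_py command → Spec_decode_fish_history_command_py command (decode_fish_history_command_py command)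

-- ===== LEMMAS AND PROOFS =====

theorem pvBSub_cons_ne (c : Char) (t : List Char) (h : c ≠ '\\') :
    pvBSub (c :: t) = c :: pvBSub t := by
  cases t with
  | nil => simp [pvBSub]
  | cons c2 rest => simp [pvBSub, h]

theorem pvALoop_eq (cmd : List Char) (index : Nat) (decoded : List Char) :
    pvALoop cmd index decoded = decoded ++ pvBSub (cmd.drop index) := by
  by_cases h : index < cmd.length
  · have hdrop : cmd.drop index = cmd[index] :: cmd.drop (index + 1) :=
      List.drop_eq_getElem_cons h
    rw [pvALoop]
    simp only [h, dif_pos]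
    by_cases hc : cmd[index] = '\\'
    · simp only [hc, ne_eq, not_true_eq_false, if_false]
      by_cases h2 : index + 1 < cmd.length
      · have hdrop2 : cmd.drop (index + 1) = cmd[index + 1] :: cmd.drop (index + 2) :=
          List.drop_eq_getElem_cons h2
        simp only [h2, dif_pos]
        rw [pvALoop_eq cmd (index + 2), hdrop, hdrop2, hc, pvBSub]
        by_cases hn : cmd[index + 1] = 'n'
        · simp [hn]
        · by_cases hb : cmd[index + 1] = '\\' <;> simp [hn, hb]
      · have hdrop2 : cmd.drop (index + 1) = [] := by
          apply List.drop_eq_nil_of_le; omega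
        simp only [h2, dif_neg, not_false_iff]
        rw [hdrop, hdrop2, hc]
        simp [pvBSub]
    · simp only [hc, ne_eq, not_false_eq_true, if_true]
      rw [pvALoop_eq cmd (index + 1), hdrop, pvBSub_cons_ne _ _ hc, List.append_assoc]
      rfl
  · rw [pvALoop]
    simp only [h, dif_neg, not_false_iff]
    have : cmd.drop index = [] := List.drop_eq_nil_of_le (by omega)
    simp [this, pvBSub]
termination_by cmd.length - index

-- ===== VERDICT (by name: the statement is the Claim_ definition above) =====
theorem decode_fish_history_command_py_spec : Claim_equal_decode_fish_history_command_py := by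
  intro command _
  unfold Spec_decode_fish_history_command_py decode_fish_history_command_py decode_fish_history_command_py_alt
  rw [pvALoop_eq]
  simp
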